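-- pv_equiv track=rewrite | github.com/open-writing-evaluation/jp_errant_bea | jp_errant/sent_alignment.py | match_sent
-- ===== SOURCE A (Python) =====
-- def match_sent(P1, P2):
--     match_pair = {}
--     multi_match = set()
--     for idx, s in enumerate(P1):
--         if s not in match_pair and s not in multi_match:
--             match_pair[s] = [idx, -1]
--         else:
--             multi_match.add(s)
--             if s in match_pair:
--                 match_pair.pop(s)
--
--     for idx, s in enumerate(P2):
--         if s in match_pair:
--             if match_pair[s][1] == -1 and s not in multi_match:
--                 match_pair[s][1] = idx
--             else:
--                 multi_match.add(s)
--                 match_pair[s][1] = -1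
--
--     match_ids = list()
--     for s, idx in match_pair.items():
--         if idx[0] != -1 and idx[1] != -1:
--             match_ids.append([idx[0], idx[1]])
--     match_ids = sorted(match_ids)
--
--     return match_ids
-- ===== SOURCE B (Python) =====
-- def _pass(P):
--     c, first = {}, {}
--     for i, s in enumerate(P):
--         c[s] = c.get(s, 0) + 1
--         if s not in first:
--             first[s] = i
--     return c, first
--
-- def match_sent(P1, P2):
--     c1, first1 = _pass(P1)
--     c2, first2 = _pass(P2)
--     match_ids = [[first1[s], first2[s]] for s in first1
--                  if c1[s] == 1 and c2.get(s, 0) == 1]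
--     return sorted(match_ids)
-- ===== Notes on version B (the rewrite author's own statement) =====
-- stated objective: simpler
-- what changed: Replaced A's in-place dedup/pop/invalidate dict-and-set state machine with a count-then-filter approach: one pass per paragraph builds an occurrence counter and a first-index map, then a single comprehension keeps the sentences whose count is exactly 1 in both paragraphs.
import Mathlib
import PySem

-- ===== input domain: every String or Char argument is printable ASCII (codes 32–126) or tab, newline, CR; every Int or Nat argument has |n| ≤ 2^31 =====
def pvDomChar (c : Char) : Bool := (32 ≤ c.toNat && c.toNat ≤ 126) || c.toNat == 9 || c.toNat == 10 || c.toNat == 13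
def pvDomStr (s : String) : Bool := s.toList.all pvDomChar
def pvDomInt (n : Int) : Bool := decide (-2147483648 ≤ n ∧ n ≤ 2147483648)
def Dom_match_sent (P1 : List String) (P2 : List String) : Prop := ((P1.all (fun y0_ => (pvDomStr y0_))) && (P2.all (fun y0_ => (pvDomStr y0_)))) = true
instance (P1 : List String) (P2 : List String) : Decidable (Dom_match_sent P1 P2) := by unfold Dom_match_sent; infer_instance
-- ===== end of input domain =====

-- B replaces A's in-place dedup/pop dict-and-set state machine by count-then-filter
-- (per-paragraph occurrence counters + first-index maps, then one filtering pass): simpler.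


-- ===== PORT A =====
-- first loop of A: dedup into match_pair, collect duplicates in multi_match (popping them)
def pvAStep1 (st : PySem.Dict String (Int × Int) × PySem.Set String) (p : Int × String) :
    PySem.Dict String (Int × Int) × PySem.Set String :=
  if ¬ st.1.contains p.2 ∧ ¬ PySem.Set.contains st.2 p.2 then
    (st.1.insert p.2 (p.1, -1), st.2)
  else
    let mm := PySem.Set.add st.2 p.2
    if st.1.contains p.2 then (st.1.erase p.2, mm) else (st.1, mm)

-- second loop of A: fill in (or invalidate) the P2 slot
def pvAStep2 (st : PySem.Dict String (Int × Int) × PySem.Set String) (p : Int × String) :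
    PySem.Dict String (Int × Int) × PySem.Set String :=
  match st.1.get? p.2 with
  | none => st
  | some v =>
    if v.2 = -1 ∧ ¬ PySem.Set.contains st.2 p.2 then
      (st.1.insert p.2 (v.1, p.1), st.2)
    else
      (st.1.insert p.2 (v.1, -1), PySem.Set.add st.2 p.2)

def match_sent (P1 : List String) (P2 : List String) : List (List Int) :=
  let st1 := (PySem.List.enumerate P1 0).foldl pvAStep1 (PySem.Dict.empty, PySem.Set.empty)
  let st2 := (PySem.List.enumerate P2 0).foldl pvAStep2 st1
  let matchIds := st2.1.items.foldl
    (fun acc q => if q.2.1 ≠ -1 ∧ q.2.2 ≠ -1 then acc ++ [[q.2.1, q.2.2]] else acc) []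
  PySem.List.sorted matchIds (fun x => x) false

-- ===== PORT B =====
-- B's helper _pass: occurrence counter and first-index map of one paragraph
def pvPass (P : List String) : PySem.Dict String Int × PySem.Dict String Int :=
  (PySem.List.enumerate P 0).foldl
    (fun st p =>
      (st.1.insert p.2 (st.1.getD p.2 0 + 1),
       if ¬ st.2.contains p.2 then st.2.insert p.2 p.1 else st.2))
    (PySem.Dict.empty, PySem.Dict.empty)

def match_sent_alt (P1 : List String) (P2 : List String) : List (List Int) :=
  let s1 := pvPass P1
  let s2 := pvPass P2
  let matchIds := s1.2.keys.foldl
    (fun acc s =>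
      if s1.1.getD s 0 = 1 ∧ s2.1.getD s 0 = 1 then
        acc ++ [[s1.2.getD s 0, s2.2.getD s 0]]
      else acc) []
  PySem.List.sorted matchIds (fun x => x) false

-- ===== PRECONDITION & SPEC =====
def Spec_match_sent (P1 : List String) (P2 : List String) (out : List (List Int)) : Prop := out = match_sent_alt P1 P2
instance (P1 : List String) (P2 : List String) (out : List (List Int)) : Decidable (Spec_match_sent P1 P2 out) := by unfold Spec_match_sent; infer_instance

-- ===== CLAIM (what is proved, stated in full; the proofs are below) =====
def Claim_equal_match_sent : Prop := ∀ (P1 : List String) (P2 : List String), Dom_match_sent P1 P2 → Spec_match_sent P1 P2 (match_sent P1 P2)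

-- ===== LEMMAS AND PROOFS =====
def pvIdx (s : String) (xs : List String) : Int := (xs.idxOf s : Int)

-- state of A's dict after loop 1 (ys = []) resp. loop 2 (ys = P2), as an items list
def pvAspec2 (xs ys : List String) : List (String × (Int × Int)) :=
  (PySem.List.dedup xs).filterMap (fun s =>
    if xs.count s = 1 then some (s, (pvIdx s xs, if ys.count s = 1 then pvIdx s ys else -1)) else none)

-- B's first-index dict as an items list
def pvFirst (xs : List String) : List (String × Int) :=
  (PySem.List.dedup xs).map (fun s => (s, pvIdx s xs))

-- the common result list both programs sort
def pvG (P1 P2 : List String) : List (List Int) :=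
  (PySem.List.dedup P1).foldl (fun acc s =>
    if P1.count s = 1 ∧ P2.count s = 1 then acc ++ [[pvIdx s P1, pvIdx s P2]] else acc) []

lemma pv_dedup_append (xs : List String) (x : String) :
    PySem.List.dedup (xs ++ [x]) =
      if x ∈ xs then PySem.List.dedup xs else PySem.List.dedup xs ++ [x] := by
  simp only [PySem.List.dedup, PySem.Set.ofList_eq_foldl, List.foldl_append, List.foldl_cons,
    List.foldl_nil]
  simp only [PySem.Set.add]
  rw [show PySem.Set.contains (List.foldl PySem.Set.add [] xs) x = decide (x ∈ xs) from ?_]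
  · split <;> simp_all
  · simp only [PySem.Set.contains, ← PySem.Set.ofList_eq_foldl]
    simp [PySem.Set.mem_ofList]

lemma pv_contains_add (m : PySem.Set String) (x s : String) :
    PySem.Set.contains (PySem.Set.add m x) s = (PySem.Set.contains m s || s == x) := by
  simp only [PySem.Set.add, PySem.Set.contains]
  split <;> rename_i h
  · by_cases hsx : s = x <;> simp_all
  · by_cases hsx : s = x <;> simp_all

lemma pv_map_fst_filterMap {ν : Type} (l : List String) (p : String → Prop) [DecidablePred p]
    (u : String → ν) :
    (l.filterMap (fun s => if p s then some (s, u s) else none)).map Prod.fst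
      = l.filter (fun s => decide (p s)) := by
  induction l with
  | nil => rfl
  | cons x t ih => by_cases hx : p x <;> simp [hx, ih]

lemma pv_count_append_ne (xs : List String) (s x : String) (h : s ≠ x) :
    (xs ++ [x]).count s = xs.count s := by
  simp [List.count_append, Ne.symm h]

lemma pv_idxOf_append_mem (xs : List String) (s x : String) (h : s ∈ xs) :
    pvIdx s (xs ++ [x]) = pvIdx s xs := by
  simp [pvIdx, List.idxOf_append_of_mem h]

lemma pv_idxOf_append_self (xs : List String) (x : String) (h : x ∉ xs) :
    pvIdx x (xs ++ [x]) = (xs.length : Int) := by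
  simp [pvIdx, List.idxOf_append, h]

lemma pv_mem_keys_aspec2 (xs ys : List String) (s : String) :
    s ∈ (pvAspec2 xs ys).map Prod.fst ↔ xs.count s = 1 := by
  unfold pvAspec2
  rw [pv_map_fst_filterMap]
  simp only [List.mem_filter, PySem.List.mem_dedup, decide_eq_true_eq]
  constructor
  · rintro ⟨-, h⟩; exact h
  · intro h; exact ⟨by rw [← List.count_pos_iff]; omega, h⟩

lemma pv_nodup_keys_aspec2 (xs ys : List String) : ((pvAspec2 xs ys).map Prod.fst).Nodup := by
  unfold pvAspec2; rw [pv_map_fst_filterMap]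
  exact (PySem.List.nodup_dedup xs).filter _

lemma pv_contains_aspec2 (xs ys : List String) (s : String) :
    (PySem.Dict.mk (pvAspec2 xs ys)).contains s = decide (xs.count s = 1) := by
  rw [PySem.Dict.contains_eq_decide_mem_keys, PySem.Dict.keys_mk]
  simp [pv_mem_keys_aspec2]

lemma pv_get?_aspec2 (xs ys : List String) (y : String) (h : xs.count y = 1) :
    (PySem.Dict.mk (pvAspec2 xs ys)).get? y
      = some (pvIdx y xs, if ys.count y = 1 then pvIdx y ys else -1) := by
  apply PySem.Dict.get?_of_mem_items
  · unfold pvAspec2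
    exact List.mem_filterMap.2 ⟨y, (PySem.List.mem_dedup xs y).2 (by rw [← List.count_pos_iff]; omega),
      by rw [if_pos h]⟩
  · rw [PySem.Dict.keys_mk]; exact pv_nodup_keys_aspec2 xs ys

lemma pv_foldl_filterMap {α β γ : Type} (l : List α) (f : α → Option β) (g : γ → β → γ) (a : γ) :
    (l.filterMap f).foldl g a = l.foldl (fun a s => (f s).elim a (g a)) a := by
  induction l generalizing a with
  | nil => rfl
  | cons x t ih => cases hx : f x <;> simp [hx, ih]

lemma pv_loop1 (xs : List String) :
    ((PySem.List.enumerate xs 0).foldl pvAStep1 (PySem.Dict.empty, PySem.Set.empty)).1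
        = PySem.Dict.mk (pvAspec2 xs []) ∧
    (∀ s, PySem.Set.contains
        ((PySem.List.enumerate xs 0).foldl pvAStep1 (PySem.Dict.empty, PySem.Set.empty)).2 s
        = decide (2 ≤ xs.count s)) := by
  induction xs using List.reverseRecOn with
  | nil =>
    constructor
    · rfl
    · intro s; simp [PySem.List.enumerate, PySem.Set.empty, PySem.Set.contains]
  | append_singleton xs x ih =>
    obtain ⟨ih1, ih2⟩ := ih
    rw [PySem.List.enumerate_append, List.foldl_append]
    set st := (PySem.List.enumerate xs 0).foldl pvAStep1 (PySem.Dict.empty, PySem.Set.empty) with hst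
    simp only [PySem.List.enumerate, List.foldl_cons, List.foldl_nil]
    unfold pvAStep1
    rw [ih1, pv_contains_aspec2, ih2]
    by_cases h1 : xs.count x = 1
    · -- duplicate (second occurrence): pop + add to multi
      have hx : x ∈ xs := by rw [← List.count_pos_iff]; omega
      have hcx : (xs ++ [x]).count x = 2 := by simp [List.count_append, h1]
      simp only [h1, decide_true, not_true_eq_false, false_and, if_false, if_true]
      constructor
      · simp only [PySem.Dict.erase]
        congr 1
        unfold pvAspec2
        rw [List.filter_filterMap, pv_dedup_append, if_pos hx]
        apply List.filterMap_congr
        intro s hs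
        have hsx : s ∈ xs := (PySem.List.mem_dedup xs s).1 hs
        by_cases hsx' : s = x
        · subst hsx'
          rw [if_pos h1, if_neg (show ¬ (xs ++ [s]).count s = 1 by omega)]
          simp [Option.filter]
        · rw [pv_count_append_ne xs s x hsx']
          by_cases hc : xs.count s = 1
          · rw [if_pos hc, if_pos hc, pv_idxOf_append_mem xs s x hsx]
            simp [Option.filter, hsx']
          · rw [if_neg hc, if_neg hc]; rfl
      · intro s
        rw [pv_contains_add, ih2 s]
        by_cases hsx : s = x
        · subst hsx; simp [hcx]
        · rw [pv_count_append_ne xs s x hsx]; simp [hsx]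
    · by_cases h0 : x ∈ xs
      · -- third or later occurrence: only add to multi (already there)
        have h2 : 2 ≤ xs.count x := by
          have := List.count_pos_iff.2 h0; omega
        rw [if_neg (by simp [h2]), if_neg (by simp [h1])]
        constructor
        · dsimp only
          unfold pvAspec2
          rw [pv_dedup_append, if_pos h0]
          congr 1
          apply List.filterMap_congr
          intro s hs
          have hsx : s ∈ xs := (PySem.List.mem_dedup xs s).1 hs
          by_cases hsx' : s = x
          · subst hsx'
            rw [if_neg h1, if_neg (by rw [List.count_append]; simp; omega)]
          · rw [pv_count_append_ne xs s x hsx']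
            by_cases hc : xs.count s = 1
            · rw [if_pos hc, if_pos hc, pv_idxOf_append_mem xs s x hsx]
            · rw [if_neg hc, if_neg hc]
        · intro s
          rw [pv_contains_add, ih2 s]
          by_cases hsx : s = x
          · subst hsx; simp [List.count_append]; omega
          · rw [pv_count_append_ne xs s x hsx]; simp [hsx]
      · -- fresh: insert
        have hc0 : xs.count x = 0 := List.count_eq_zero.2 h0
        rw [if_pos ⟨by simp [h1], by simp [hc0]⟩]
        constructor
        · dsimp only
          apply PySem.Dict.ext
          have h' : ({ items := pvAspec2 xs [] } : PySem.Dict String (Int × Int)).contains x = false := by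
            rw [pv_contains_aspec2]; simp [h1]
          rw [PySem.Dict.items_insert_of_not_contains _ _ h']
          show pvAspec2 xs [] ++ _ = pvAspec2 (xs ++ [x]) []
          unfold pvAspec2
          rw [pv_dedup_append, if_neg h0, List.filterMap_append]
          congr 1
          · apply List.filterMap_congr
            intro s hs
            have hsx : s ∈ xs := (PySem.List.mem_dedup xs s).1 hs
            have hsx' : s ≠ x := fun h => h0 (h ▸ hsx)
            rw [pv_count_append_ne xs s x hsx']
            by_cases hc : xs.count s = 1
            · rw [if_pos hc, if_pos hc, pv_idxOf_append_mem xs s x hsx]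
            · rw [if_neg hc, if_neg hc]
          · have hcx1 : (xs ++ [x]).count x = 1 := by simp [List.count_append, hc0]
            simp only [List.filterMap_cons, List.filterMap_nil, hcx1, if_pos]
            rw [pv_idxOf_append_self xs x h0]
            simp
        · intro s
          rw [ih2 s]
          by_cases hsx : s = x
          · subst hsx; simp [List.count_append, hc0]
          · rw [pv_count_append_ne xs s x hsx]

lemma pv_aspec2_append_irrel (xs ys : List String) (y : String) (hq : ¬ xs.count y = 1) :
    pvAspec2 xs (ys ++ [y]) = pvAspec2 xs ys := by
  unfold pvAspec2
  apply List.filterMap_congr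
  intro s _
  by_cases hc : xs.count s = 1
  · have hsy : s ≠ y := fun h => hq (h ▸ hc)
    rw [if_pos hc, if_pos hc, pv_count_append_ne ys s y hsy]
    by_cases hc2 : ys.count s = 1
    · rw [if_pos hc2, if_pos hc2,
        pv_idxOf_append_mem ys s y (List.count_pos_iff.1 (by omega))]
    · rw [if_neg hc2, if_neg hc2]
  · rw [if_neg hc, if_neg hc]

lemma pv_aspec2_replace (xs ys : List String) (y : String) (hq : xs.count y = 1) (w : Int)
    (hw : w = if (ys ++ [y]).count y = 1 then pvIdx y (ys ++ [y]) else -1) :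
    (pvAspec2 xs ys).map (fun q => if q.1 == y then (y, (pvIdx y xs, w)) else q)
      = pvAspec2 xs (ys ++ [y]) := by
  unfold pvAspec2
  rw [List.map_filterMap]
  apply List.filterMap_congr
  intro s _
  by_cases hc : xs.count s = 1
  · rw [if_pos hc, if_pos hc]
    by_cases hsy : s = y
    · subst hsy; simp [hw]
    · have : (s == y) = false := by simp [hsy]
      simp only [Option.map_some, this, Bool.false_eq_true, if_false]
      rw [pv_count_append_ne ys s y hsy]
      by_cases hc2 : ys.count s = 1
      · rw [if_pos hc2, if_pos hc2,
          pv_idxOf_append_mem ys s y (List.count_pos_iff.1 (by omega))]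
      · rw [if_neg hc2, if_neg hc2]
  · rw [if_neg hc, if_neg hc]; rfl

lemma pv_loop2 (xs ys : List String) :
    ((PySem.List.enumerate ys 0).foldl pvAStep2
        ((PySem.List.enumerate xs 0).foldl pvAStep1 (PySem.Dict.empty, PySem.Set.empty))).1
        = PySem.Dict.mk (pvAspec2 xs ys) ∧
    (∀ s, PySem.Set.contains
        ((PySem.List.enumerate ys 0).foldl pvAStep2
          ((PySem.List.enumerate xs 0).foldl pvAStep1 (PySem.Dict.empty, PySem.Set.empty))).2 s
        = decide (2 ≤ xs.count s ∨ (xs.count s = 1 ∧ 2 ≤ ys.count s))) := by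
  induction ys using List.reverseRecOn with
  | nil =>
    obtain ⟨h1, h2⟩ := pv_loop1 xs
    refine ⟨?_, fun s => ?_⟩ <;>
      simp only [PySem.List.enumerate_nil, List.foldl_nil]
    · exact h1
    · rw [h2 s]; simp
  | append_singleton ys y ih =>
    obtain ⟨ih1, ih2⟩ := ih
    rw [PySem.List.enumerate_append, List.foldl_append]
    set st := (PySem.List.enumerate ys 0).foldl pvAStep2
      ((PySem.List.enumerate xs 0).foldl pvAStep1 (PySem.Dict.empty, PySem.Set.empty)) with hst
    simp only [PySem.List.enumerate, List.foldl_cons, List.foldl_nil]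
    unfold pvAStep2
    rw [ih1]
    by_cases hq : xs.count y = 1
    · rw [pv_get?_aspec2 xs ys y hq]
      simp only []
      rw [ih2]
      by_cases hc1 : ys.count y = 1
      · -- second P2 occurrence: invalidate
        rw [if_pos hc1]
        have hne : ¬ (pvIdx y ys = -1 ∧
            ¬ decide (2 ≤ xs.count y ∨ (xs.count y = 1 ∧ 2 ≤ ys.count y)) = true) := by
          intro ⟨h, _⟩
          unfold pvIdx at h; omega
        rw [if_neg hne]
        constructor
        · dsimp only
          apply PySem.Dict.ext
          rw [PySem.Dict.items_insert_of_contains _ _ (by rw [pv_contains_aspec2]; simp [hq])]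
          show _ = pvAspec2 xs (ys ++ [y])
          rw [← pv_aspec2_replace xs ys y hq (-1)
            (by rw [if_neg (show ¬ (ys ++ [y]).count y = 1 by simp [List.count_append, hc1])])]
        · intro s
          rw [pv_contains_add, ih2 s]
          by_cases hsy : s = y
          · subst hsy; simp [List.count_append, hq, hc1]
          · rw [pv_count_append_ne ys s y hsy]; simp [hsy]
      · by_cases hc0 : ys.count y = 0
        · -- first P2 occurrence: record the index
          rw [if_neg hc1]
          have hyn : y ∉ ys := List.count_eq_zero.1 hc0
          have hpos : (-1 : Int) = -1 ∧
              ¬ decide (2 ≤ xs.count y ∨ (xs.count y = 1 ∧ 2 ≤ ys.count y)) = true := by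
            constructor
            · rfl
            · simp; omega
          rw [if_pos hpos]
          constructor
          · dsimp only
            apply PySem.Dict.ext
            rw [PySem.Dict.items_insert_of_contains _ _ (by rw [pv_contains_aspec2]; simp [hq])]
            show _ = pvAspec2 xs (ys ++ [y])
            rw [← pv_aspec2_replace xs ys y hq (0 + (ys.length : Int))
              (by rw [if_pos (by simp [List.count_append, hc0]),
                      pv_idxOf_append_self ys y hyn]; omega)]
          · intro s
            rw [ih2 s]
            by_cases hsy : s = y
            · subst hsy; simp [List.count_append, hc0]
            · rw [pv_count_append_ne ys s y hsy]
        · -- third or later P2 occurrence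
          have hc2 : 2 ≤ ys.count y := by omega
          rw [if_neg hc1]
          have hne : ¬ ((-1 : Int) = -1 ∧
              ¬ decide (2 ≤ xs.count y ∨ (xs.count y = 1 ∧ 2 ≤ ys.count y)) = true) := by
            intro ⟨_, h⟩
            exact h (by simp [hq, hc2])
          rw [if_neg hne]
          constructor
          · dsimp only
            apply PySem.Dict.ext
            rw [PySem.Dict.items_insert_of_contains _ _ (by rw [pv_contains_aspec2]; simp [hq])]
            show _ = pvAspec2 xs (ys ++ [y])
            rw [← pv_aspec2_replace xs ys y hq (-1)
              (by rw [if_neg (show ¬ (ys ++ [y]).count y = 1 by simp [List.count_append]; omega)])]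
          · intro s
            rw [pv_contains_add, ih2 s]
            by_cases hsy : s = y
            · subst hsy
              simp only [BEq.rfl, Bool.or_true]
              rw [eq_comm, decide_eq_true_eq]
              right
              refine ⟨hq, ?_⟩
              rw [List.count_append]
              have : List.count s [s] = 1 := by simp
              omega
            · rw [pv_count_append_ne ys s y hsy]; simp [hsy]
    · -- sentence not unique in P1: not in the dict, nothing happens
      have hnone : (PySem.Dict.mk (pvAspec2 xs ys)).get? y = none := by
        rw [PySem.Dict.get?_eq_none_iff_not_mem_keys, PySem.Dict.keys_mk]
        intro hmem
        exact hq ((pv_mem_keys_aspec2 xs ys y).1 hmem)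
      rw [hnone]
      constructor
      · rw [pv_aspec2_append_irrel xs ys y hq]; exact ih1
      · intro s
        rw [ih2 s]
        by_cases hsy : s = y
        · subst hsy; simp [hq]
        · rw [pv_count_append_ne ys s y hsy]

lemma pv_foldl_enumerate {σ : Type} (P : List String) (k : Int) (f : σ → String → σ) (a : σ) :
    (PySem.List.enumerate P k).foldl (fun d p => f d p.2) a = P.foldl f a := by
  conv_rhs => rw [← PySem.List.map_snd_enumerate P k]
  rw [List.foldl_map]

lemma pv_contains_first (P : List String) (x : String) :
    (PySem.Dict.mk (pvFirst P)).contains x = decide (x ∈ P) := by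
  rw [PySem.Dict.contains_eq_decide_mem_keys, PySem.Dict.keys_mk]
  unfold pvFirst
  simp [List.map_map]

lemma pv_getD_first (P : List String) (s : String) (h : s ∈ P) :
    (PySem.Dict.mk (pvFirst P)).getD s 0 = pvIdx s P := by
  apply PySem.Dict.getD_of_mem_items
  · exact List.mem_map.2 ⟨s, (PySem.List.mem_dedup P s).2 h, rfl⟩
  · rw [PySem.Dict.keys_mk]
    unfold pvFirst
    rw [List.map_map]
    have hid : ((fun (x : String × Int) => x.1) ∘ fun s => (s, pvIdx s P)) = id := rfl
    rw [hid, List.map_id]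
    exact PySem.List.nodup_dedup P

lemma pv_first_fold (P : List String) :
    (PySem.List.enumerate P 0).foldl
        (fun f p => if ¬ f.contains p.2 then f.insert p.2 p.1 else f) PySem.Dict.empty
      = PySem.Dict.mk (pvFirst P) := by
  induction P using List.reverseRecOn with
  | nil => rfl
  | append_singleton P x ih =>
    rw [PySem.List.enumerate_append, List.foldl_append, ih]
    simp only [PySem.List.enumerate, List.foldl_cons, List.foldl_nil]
    rw [pv_contains_first]
    by_cases hx : x ∈ P
    · rw [if_neg (by simp [hx])]
      congr 1
      unfold pvFirst
      rw [pv_dedup_append, if_pos hx]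
      apply List.map_congr_left
      intro s hs
      rw [pv_idxOf_append_mem P s x ((PySem.List.mem_dedup P s).1 hs)]
    · rw [if_pos (by simp [hx])]
      apply PySem.Dict.ext
      rw [PySem.Dict.items_insert_of_not_contains _ _ (by rw [pv_contains_first]; simp [hx])]
      show pvFirst P ++ _ = pvFirst (P ++ [x])
      unfold pvFirst
      rw [pv_dedup_append, if_neg hx, List.map_append]
      congr 1
      · apply List.map_congr_left
        intro s hs
        rw [pv_idxOf_append_mem P s x ((PySem.List.mem_dedup P s).1 hs)]
      · rw [List.map_singleton, pv_idxOf_append_self P x hx]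
        norm_num

lemma pv_pass_spec (P : List String) :
    pvPass P = (P.foldl (fun d x => d.insert x (d.getD x 0 + 1)) PySem.Dict.empty,
                PySem.Dict.mk (pvFirst P)) := by
  unfold pvPass
  rw [PySem.List.foldl_prod_mk
    (fun (d : PySem.Dict String Int) (p : Int × String) => d.insert p.2 (d.getD p.2 0 + 1))
    (fun (f : PySem.Dict String Int) (p : Int × String) =>
      if ¬ f.contains p.2 then f.insert p.2 p.1 else f)]
  apply Prod.ext
  · dsimp only
    exact pv_foldl_enumerate P 0
      (fun (d : PySem.Dict String Int) (x : String) => d.insert x (d.getD x 0 + 1)) PySem.Dict.empty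
  · dsimp only
    exact pv_first_fold P

lemma pv_count_getD (P : List String) (s : String) :
    (P.foldl (fun d x => d.insert x (d.getD x 0 + 1)) PySem.Dict.empty).getD s 0
      = (P.count s : Int) := by
  rw [PySem.Dict.getD_foldl_insert_add_one]
  simp

lemma pv_A_eq (P1 P2 : List String) :
    match_sent P1 P2 = PySem.List.sorted (pvG P1 P2) (fun x => x) false := by
  unfold match_sent
  dsimp only
  rw [(pv_loop2 P1 P2).1]
  congr 1
  show (pvAspec2 P1 P2).foldl _ [] = _
  unfold pvAspec2 pvG
  rw [pv_foldl_filterMap]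
  apply PySem.List.foldl_congr_mem
  intro acc s hs
  by_cases h1 : P1.count s = 1
  · rw [if_pos h1]
    have hi1 : pvIdx s P1 ≠ -1 := by unfold pvIdx; omega
    by_cases h2 : P2.count s = 1
    · rw [if_pos h2, if_pos ⟨h1, h2⟩]
      simp only [Option.elim]
      rw [if_pos ⟨hi1, by unfold pvIdx; omega⟩]
    · rw [if_neg h2, if_neg (by tauto)]
      simp only [Option.elim]
      rw [if_neg (fun h => h.2 rfl)]
  · rw [if_neg h1, if_neg (by tauto)]
    simp only [Option.elim]

lemma pv_B_eq (P1 P2 : List String) :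
    match_sent_alt P1 P2 = PySem.List.sorted (pvG P1 P2) (fun x => x) false := by
  unfold match_sent_alt
  dsimp only
  rw [pv_pass_spec P1, pv_pass_spec P2]
  dsimp only
  rw [show (PySem.Dict.mk (pvFirst P1)).keys = PySem.List.dedup P1 from by
    rw [PySem.Dict.keys_mk]
    unfold pvFirst
    rw [List.map_map]
    have hid : ((fun (x : String × Int) => x.1) ∘ fun s => (s, pvIdx s P1)) = id := rfl
    rw [hid, List.map_id]]
  congr 1
  unfold pvG
  apply PySem.List.foldl_congr_mem
  intro acc s hs
  have hmem : s ∈ P1 := (PySem.List.mem_dedup P1 s).1 hs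
  rw [pv_count_getD P1 s, pv_count_getD P2 s]
  by_cases h1 : P1.count s = 1
  · by_cases h2 : P2.count s = 1
    · rw [if_pos (by constructor <;> [rw [h1]; rw [h2]] <;> rfl), if_pos ⟨h1, h2⟩]
      rw [pv_getD_first P1 s hmem,
        pv_getD_first P2 s (List.count_pos_iff.1 (by omega))]
    · rw [if_neg (by omega), if_neg (by tauto)]
  · rw [if_neg (by omega), if_neg (by tauto)]

-- ===== VERDICT (by name: the statement is the Claim_ definition above) =====
theorem match_sent_spec : Claim_equal_match_sent := by
  intro P1 P2 _
  unfold Spec_match_sent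
  rw [pv_A_eq, pv_B_eq]
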